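-- pv_equiv track=rewrite | github.com/mekkablue/Glyphs-Scripts | Glyph Names, Notes and Unicode/Encoding Converter.py | isValidGlyphName
-- ===== SOURCE A (Python) =====
-- def isValidGlyphName(glyphName):
-- 	validCharacters="abcdefghijklmnopqrstuvwxyzABCDEFGHIJKLMNOPQRSTUVWXYZ0123456789_-."
-- 	if len(glyphName)==0 or glyphName[0]=="-":
-- 		return False
-- 	for letter in glyphName:
-- 		if not letter in validCharacters:
-- 			return False
-- 	return True
-- ===== SOURCE B (Python) =====
-- import re
--
-- _GLYPHNAME_RE = re.compile(r"[a-zA-Z0-9_.][a-zA-Z0-9_.-]*")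
--
-- def isValidGlyphName(glyphName):
-- 	return _GLYPHNAME_RE.fullmatch(glyphName) is not None
-- ===== Notes on version B (the rewrite author's own statement) =====
-- stated objective: idiomatic
-- what changed: Replaced the explicit per-character loop and separate leading-hyphen check with a single precompiled regular-expression fullmatch whose first character class omits the hyphen.
import Mathlib
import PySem

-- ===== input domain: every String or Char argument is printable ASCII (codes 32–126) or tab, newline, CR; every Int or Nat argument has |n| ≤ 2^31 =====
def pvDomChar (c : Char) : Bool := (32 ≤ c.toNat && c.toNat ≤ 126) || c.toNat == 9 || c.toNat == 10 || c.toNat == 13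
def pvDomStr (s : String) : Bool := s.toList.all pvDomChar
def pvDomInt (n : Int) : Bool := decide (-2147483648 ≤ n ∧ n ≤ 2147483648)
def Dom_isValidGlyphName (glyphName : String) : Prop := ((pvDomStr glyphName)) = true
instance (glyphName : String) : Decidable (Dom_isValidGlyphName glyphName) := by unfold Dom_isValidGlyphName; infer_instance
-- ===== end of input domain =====

-- B replaces A's explicit character loop and leading-hyphen check with one precompiled regular-expression fullmatch (idiomatic).


-- ===== PORT A =====
-- validCharacters = "abc…XYZ0123456789_-." as a list of characters
def pvValidChars : List Char := ['a', 'b', 'c', 'd', 'e', 'f', 'g', 'h', 'i', 'j', 'k', 'l', 'm', 'n', 'o', 'p', 'q', 'r', 's', 't', 'u', 'v', 'w', 'x', 'y', 'z', 'A', 'B', 'C', 'D', 'E', 'F', 'G', 'H', 'I', 'J', 'K', 'L', 'M', 'N', 'O', 'P', 'Q', 'R', 'S', 'T', 'U', 'V', 'W', 'X', 'Y', 'Z', '0', '1', '2', '3', '4', '5', '6', '7', '8', '9', '_', '-', '.']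

-- the `for letter in glyphName` loop with its early `return False`
def pvLoopA : List Char → Bool
  | [] => true
  | c :: rest => if !(pvValidChars.contains c) then false else pvLoopA rest

def isValidGlyphName (glyphName : String) : Bool :=
  match glyphName.toList with
  | [] => false                         -- len(glyphName) == 0
  | c :: rest => if c == '-' then false -- glyphName[0] == "-"
                 else pvLoopA (c :: rest)

-- ===== PORT B =====
-- the regex r"[a-zA-Z0-9_.][a-zA-Z0-9_.-]*": its two character classes …
def pvFirstClass : List Char := ['a', 'b', 'c', 'd', 'e', 'f', 'g', 'h', 'i', 'j', 'k', 'l', 'm', 'n', 'o', 'p', 'q', 'r', 's', 't', 'u', 'v', 'w', 'x', 'y', 'z', 'A', 'B', 'C', 'D', 'E', 'F', 'G', 'H', 'I', 'J', 'K', 'L', 'M', 'N', 'O', 'P', 'Q', 'R', 'S', 'T', 'U', 'V', 'W', 'X', 'Y', 'Z', '0', '1', '2', '3', '4', '5', '6', '7', '8', '9', '_', '.']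
def pvRestClass : List Char := ['a', 'b', 'c', 'd', 'e', 'f', 'g', 'h', 'i', 'j', 'k', 'l', 'm', 'n', 'o', 'p', 'q', 'r', 's', 't', 'u', 'v', 'w', 'x', 'y', 'z', 'A', 'B', 'C', 'D', 'E', 'F', 'G', 'H', 'I', 'J', 'K', 'L', 'M', 'N', 'O', 'P', 'Q', 'R', 'S', 'T', 'U', 'V', 'W', 'X', 'Y', 'Z', '0', '1', '2', '3', '4', '5', '6', '7', '8', '9', '_', '-', '.']

-- … and fullmatch of class·class*: one first-class character, then all remaining in the rest class
def isValidGlyphName_alt (glyphName : String) : Bool :=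
  match glyphName.toList with
  | [] => false
  | c :: rest => pvFirstClass.contains c && rest.all (pvRestClass.contains ·)

-- ===== PRECONDITION & SPEC =====
def Spec_isValidGlyphName (glyphName : String) (out : Bool) : Prop := out = isValidGlyphName_alt glyphName
instance (glyphName : String) (out : Bool) : Decidable (Spec_isValidGlyphName glyphName out) := by unfold Spec_isValidGlyphName; infer_instance

-- ===== CLAIM (what is proved, stated in full; the proofs are below) =====
def Claim_equal_isValidGlyphName : Prop := ∀ (glyphName : String), Dom_isValidGlyphName glyphName → Spec_isValidGlyphName glyphName (isValidGlyphName glyphName)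

-- ===== LEMMAS AND PROOFS =====

-- A's loop is `all` over the valid set
theorem pvLoopA_eq_all (cs : List Char) : pvLoopA cs = cs.all (pvValidChars.contains ·) := by
  induction cs with
  | nil => rfl
  | cons c rest ih =>
    simp only [pvLoopA, List.all_cons, ih]
    cases pvValidChars.contains c <;> simp

-- B's rest class is exactly A's valid set
theorem pvRest_eq_valid : pvRestClass = pvValidChars := by decide

-- B's first class = A's valid set minus '-' (via a shared prefix of the two literal lists)
def pvAlnum : List Char := ['a', 'b', 'c', 'd', 'e', 'f', 'g', 'h', 'i', 'j', 'k', 'l', 'm', 'n', 'o', 'p', 'q', 'r', 's', 't', 'u', 'v', 'w', 'x', 'y', 'z', 'A', 'B', 'C', 'D', 'E', 'F', 'G', 'H', 'I', 'J', 'K', 'L', 'M', 'N', 'O', 'P', 'Q', 'R', 'S', 'T', 'U', 'V', 'W', 'X', 'Y', 'Z', '0', '1', '2', '3', '4', '5', '6', '7', '8', '9', '_']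

theorem pvFirst_eq (c : Char) : pvFirstClass.contains c = (pvValidChars.contains c && !(c == '-')) := by
  have h1 : pvFirstClass = pvAlnum ++ ['.'] := by decide
  have h2 : pvValidChars = pvAlnum ++ ['-', '.'] := by decide
  rw [h1, h2]
  by_cases h : c = '-'
  · subst h
    have hA : '-' ∉ pvAlnum := by decide
    simp [hA]
  · simp [List.contains_eq_mem, h]

-- ===== VERDICT (by name: the statement is the Claim_ definition above) =====
theorem isValidGlyphName_spec : Claim_equal_isValidGlyphName := by
  intro s _
  show isValidGlyphName s = isValidGlyphName_alt s
  unfold isValidGlyphName isValidGlyphName_alt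
  cases h : s.toList with
  | nil => rfl
  | cons c rest =>
    simp only [pvFirst_eq, pvRest_eq_valid, pvLoopA_eq_all, List.all_cons]
    by_cases hc : c = '-'
    · subst hc; simp
    · have h' : (c == '-') = false := by simp [hc]
      simp [h']
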